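-- pv_equiv track=rewrite | github.com/cgcgcg/vvtest | trig/perms.py | split_specs_by_commas
-- ===== SOURCE A (Python) =====
-- def split_specs_by_commas( stringspecs ):
--     ""
--     sL = []
--
--     for sspec in stringspecs:
--         for s in sspec.split(','):
--             s = s.strip()
--             if s:
--                 sL.append(s)
--
--     return sL
-- ===== SOURCE B (Python) =====
-- def split_specs_by_commas(stringspecs):
--     ""
--     combined = ','.join(stringspecs)
--     return [t for t in (tok.strip() for tok in combined.split(',')) if t]
-- ===== Notes on version B (the rewrite author's own statement) =====
-- stated objective: alternative
-- what changed: Replaces the nested per-spec/per-token loops with accumulator appends by a single join of all specs into one string, one split on commas, and a comprehension that strips and filters the tokens.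
import Mathlib
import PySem

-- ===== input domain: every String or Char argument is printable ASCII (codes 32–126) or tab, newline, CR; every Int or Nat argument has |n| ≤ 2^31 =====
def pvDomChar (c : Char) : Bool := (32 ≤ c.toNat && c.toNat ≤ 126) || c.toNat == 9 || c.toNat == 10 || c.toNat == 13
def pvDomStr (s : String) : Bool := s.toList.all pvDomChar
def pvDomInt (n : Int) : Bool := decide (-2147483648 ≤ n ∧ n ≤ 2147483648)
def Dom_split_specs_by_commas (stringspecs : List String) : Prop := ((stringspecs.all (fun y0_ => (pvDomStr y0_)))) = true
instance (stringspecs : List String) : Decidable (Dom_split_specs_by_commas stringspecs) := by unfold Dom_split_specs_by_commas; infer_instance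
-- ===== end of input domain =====

-- B builds one combined string with ','.join and splits it once, instead of A's nested per-spec/per-token loops; same cost, different decomposition.
-- ===== PORT A =====
def split_specs_by_commas (stringspecs : List String) : List String :=
  stringspecs.foldl (fun sL sspec =>
    ((PySem.Str.split? sspec ",").getD []).foldl (fun sL s =>
      let s' := PySem.Str.strip s
      if s' ≠ "" then sL ++ [s'] else sL) sL) []


-- ===== PORT B =====
def split_specs_by_commas_alt (stringspecs : List String) : List String :=
  let combined := PySem.Str.join "," stringspecs
  (((PySem.Str.split? combined ",").getD []).map PySem.Str.strip).filter (fun t => t ≠ "")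


-- ===== PRECONDITION & SPEC =====
def Spec_split_specs_by_commas (stringspecs : List String) (out : List String) : Prop := out = split_specs_by_commas_alt stringspecs
instance (stringspecs : List String) (out : List String) : Decidable (Spec_split_specs_by_commas stringspecs out) := by unfold Spec_split_specs_by_commas; infer_instance

-- ===== CLAIM =====
def Claim_equal_split_specs_by_commas : Prop := ∀ (stringspecs : List String), Dom_split_specs_by_commas stringspecs → Spec_split_specs_by_commas stringspecs (split_specs_by_commas stringspecs)

-- ===== LEMMAS AND PROOFS =====

-- simple single-comma splitter (proof-side model)
def spC : List Char → List (List Char)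
  | [] => [[]]
  | c :: rest => if c = ',' then [] :: spC rest
      else match spC rest with
        | [] => [[c]]
        | p :: ps => (c :: p) :: ps

theorem spC_ne_nil (l : List Char) : spC l ≠ [] := by
  cases l with
  | nil => simp [spC]
  | cons c rest =>
    simp only [spC]
    split
    · simp
    · split <;> simp

def consHead (x : List Char) : List (List Char) → List (List Char)
  | [] => [x]
  | p :: ps => (x ++ p) :: ps

theorem spC_cons (c : Char) (rest : List Char) (h : c ≠ ',') :
    spC (c :: rest) = consHead [c] (spC rest) := by
  simp only [spC, if_neg h]
  cases hr : spC rest <;> simp [consHead]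

theorem consHead_assoc (x : List Char) (c : Char) (ps : List (List Char)) :
    consHead (x ++ [c]) ps = consHead x (consHead [c] ps) := by
  cases ps <;> simp [consHead]

theorem splitOn_go_eq : ∀ (fuel : Nat) (l cur : List Char) (acc : List (List Char)),
    l.length ≤ fuel →
    PySem.Chars.splitOn.go [','] fuel l cur acc = acc.reverse ++ consHead cur.reverse (spC l) := by
  intro fuel
  induction fuel with
  | zero =>
    intro l cur acc h
    have : l = [] := by cases l <;> simp_all
    subst this
    simp [PySem.Chars.splitOn.go, spC, consHead]
  | succ f ih =>
    intro l cur acc h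
    cases l with
    | nil => simp [PySem.Chars.splitOn.go, spC, consHead]
    | cons c rest =>
      simp only [PySem.Chars.splitOn.go]
      by_cases hc : c = ','
      · subst hc
        rw [if_pos (by simp [List.isPrefixOf])]
        simp only [List.length_cons] at h
        rw [ih _ _ _ (by simpa using Nat.le_of_succ_le_succ h)]
        simp only [spC, consHead]
        cases hr : spC rest <;> simp_all [spC_ne_nil]
      · rw [if_neg (by simp [List.isPrefixOf]; exact fun h' => hc h'.symm)]
        rw [ih _ _ _ (by simpa using Nat.le_of_succ_le_succ h)]
        rw [spC_cons c rest hc]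
        simp [consHead_assoc]

theorem splitOn_comma (cs : List Char) : PySem.Chars.splitOn cs [','] = spC cs := by
  rw [PySem.Chars.splitOn, splitOn_go_eq _ _ _ _ (by omega)]
  cases h : spC cs with
  | nil => exact absurd h (spC_ne_nil cs)
  | cons p ps => simp [consHead]

theorem spC_append (a b : List Char) : spC (a ++ ',' :: b) = spC a ++ spC b := by
  induction a with
  | nil => simp [spC]
  | cons c a' ih =>
    by_cases hc : c = ','
    · subst hc; simp [spC, ih]
    · rw [List.cons_append, spC_cons c _ hc, spC_cons c a' hc, ih]
      cases h : spC a' with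
      | nil => exact absurd h (spC_ne_nil a')
      | cons p ps => simp [consHead]

-- pieces: map strip then filter nonempty, at Chars level
def keepC (ps : List (List Char)) : List (List Char) :=
  (ps.map PySem.Chars.strip).filter (fun t => ¬ t.isEmpty)

-- A's inner loop at Chars level equals folding with append of kept strings
theorem join_comma_cons (s : List Char) (rest : List (List Char)) (h : rest ≠ []) :
    PySem.Chars.join [','] (s :: rest) = s ++ ',' :: PySem.Chars.join [','] rest := by
  cases rest with
  | nil => simp at h
  | cons r rs => simp [PySem.Chars.join, List.intercalate]

theorem spC_join (specs : List (List Char)) (h : specs ≠ []) :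
    spC (PySem.Chars.join [','] specs) = specs.flatMap spC := by
  induction specs with
  | nil => simp at h
  | cons s rest ih =>
    cases hr : rest with
    | nil => simp [PySem.Chars.join, List.intercalate]
    | cons r rs =>
      subst hr
      rw [join_comma_cons s _ (by simp), spC_append, ih (by simp)]
      simp

def piecesS (s : String) : List String := (spC s.toList).map String.ofList

theorem split?_comma (s : String) : PySem.Str.split? s "," = some (piecesS s) := by
  simp [PySem.Str.split?, PySem.Chars.split?, splitOn_comma, piecesS]

def keepS (ps : List String) : List String :=
  (ps.map PySem.Str.strip).filter (fun t => t ≠ "")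

theorem foldl_keep (ps : List String) (sL : List String) :
    ps.foldl (fun sL s =>
      let s' := PySem.Str.strip s
      if s' ≠ "" then sL ++ [s'] else sL) sL = sL ++ keepS ps := by
  induction ps generalizing sL with
  | nil => simp [keepS]
  | cons p ps ih =>
    simp only [List.foldl_cons, ih, keepS, List.map_cons, List.filter_cons]
    split_ifs with h <;> simp_all

theorem toList_join_comma (specs : List String) :
    (PySem.Str.join "," specs).toList = PySem.Chars.join [','] (specs.map String.toList) := by
  simp [PySem.Str.join]

theorem piecesS_join (specs : List String) (h : specs ≠ []) :
    piecesS (PySem.Str.join "," specs) = specs.flatMap piecesS := by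
  simp only [piecesS, toList_join_comma]
  rw [spC_join _ (by simpa using h)]
  rw [List.map_flatMap, List.flatMap_map]
  rfl

theorem foldA (specs : List String) (sL : List String) :
    specs.foldl (fun sL sspec =>
      ((PySem.Str.split? sspec ",").getD []).foldl (fun sL s =>
        let s' := PySem.Str.strip s
        if s' ≠ "" then sL ++ [s'] else sL) sL) sL
    = sL ++ keepS (specs.flatMap piecesS) := by
  induction specs generalizing sL with
  | nil => simp [keepS]
  | cons p ps ih =>
    rw [List.foldl_cons, split?_comma]
    rw [show ((some (piecesS p)).getD []) = piecesS p from rfl, foldl_keep, ih]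
    simp [keepS]


theorem mainX (stringspecs : List String) :
    split_specs_by_commas stringspecs = split_specs_by_commas_alt stringspecs := by
  cases stringspecs with
  | nil =>
    simp [split_specs_by_commas, split_specs_by_commas_alt, split?_comma, piecesS, spC]
    decide
  | cons a l =>
    rw [split_specs_by_commas, foldA, split_specs_by_commas_alt]
    rw [split?_comma, piecesS_join _ (by simp)]
    simp [keepS]

-- ===== VERDICT =====
theorem split_specs_by_commas_spec : Claim_equal_split_specs_by_commas := by
  intro stringspecs _
  unfold Spec_split_specs_by_commas
  exact mainX stringspecs
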